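-- pv_equiv track=rewrite | github.com/jso8910/advent_of_code_2022 | 2015/day_21/program.py | part_two
-- ===== SOURCE A (Python) =====
-- from itertools import product
--
-- WEAPONS = [
--     # Cost, damage, armor
--     [8, 4, 0],
--     [10, 5, 0],
--     [25, 6, 0],
--     [40, 7, 0],
--     [74, 8, 0],
-- ]
--
-- ARMOR = [
--     # Cost, damage, armor
--     [0, 0, 0],  # For not buying anything
--     [13, 0, 1],
--     [31, 0, 2],
--     [53, 0, 3],
--     [75, 0, 4],
--     [102, 0, 5]
-- ]
--
-- RINGS = [
--     [0, 0, 0],  # For not buying anything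
--     [25, 1, 0],
--     [50, 2, 0],
--     [100, 3, 0],
--     [20, 0, 1],
--     [40, 0, 2],
--     [80, 0, 3]
-- ]
--
-- def simulate(boss_damage, boss_armor, boss_hp, damage, armor, hp):
--     while hp or boss_hp:
--         boss_hp -= damage - boss_armor if damage - boss_armor > 1 else 1
--         if boss_hp <= 0:
--             return True
--         hp -= boss_damage - armor if boss_damage - armor > 1 else 1
--         if hp <= 0:
--             return False
--
-- def part_two(stats):
--     boss_hit_points = stats[0]
--     boss_damage = stats[1]
--     boss_armor = stats[2]
--     losses = []
--     for combination in product(WEAPONS, ARMOR, RINGS, RINGS):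
--         if combination[2] == combination[3] != [0, 0, 0]:
--             continue
--         cost = sum(map(lambda x: x[0], combination))
--         total_damage = sum(map(lambda x: x[1], combination))
--         total_armor = sum(map(lambda x: x[2], combination))
--         if not simulate(boss_damage, boss_armor, boss_hit_points, total_damage, total_armor, 100):
--             losses.append(cost)
--
--     return max(losses)
-- ===== SOURCE B (Python) =====
-- from itertools import product
--
-- WEAPONS = [
--     [8, 4, 0],
--     [10, 5, 0],
--     [25, 6, 0],
--     [40, 7, 0],
--     [74, 8, 0],
-- ]
--
-- ARMOR = [
--     [0, 0, 0],
--     [13, 0, 1],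
--     [31, 0, 2],
--     [53, 0, 3],
--     [75, 0, 4],
--     [102, 0, 5],
-- ]
--
-- RINGS = [
--     [0, 0, 0],
--     [25, 1, 0],
--     [50, 2, 0],
--     [100, 3, 0],
--     [20, 0, 1],
--     [40, 0, 2],
--     [80, 0, 3],
-- ]
--
-- def part_two(stats):
--     boss_hp, boss_damage, boss_armor = stats[0], stats[1], stats[2]
--     # Closed-form fight: the player wins iff the number of turns they need
--     # (ceiling division, min 1 damage per hit) is <= the boss's; ties go to
--     # the player, who strikes first.
--     losses = [
--         w[0] + a[0] + r1[0] + r2[0]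
--         for w, a, r1, r2 in product(WEAPONS, ARMOR, RINGS, RINGS)
--         if not (r1 == r2 != [0, 0, 0])
--         and -(-boss_hp // max(w[1] + r1[1] + r2[1] - boss_armor, 1))
--             > -(-100 // max(boss_damage - (a[2] + r1[2] + r2[2]), 1))
--     ]
--     return max(losses)
-- ===== Notes on version B (the rewrite author's own statement) =====
-- stated objective: simpler
-- what changed: The per-turn combat simulation loop (simulate) is replaced by a closed-form comparison of ceiling-division turn counts (player wins iff ceil(boss_hp/player_dmg) <= ceil(100/boss_dmg), min 1 damage per hit, ties to the player who strikes first), computed once per loadout inside one filtering comprehension.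
import Mathlib
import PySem

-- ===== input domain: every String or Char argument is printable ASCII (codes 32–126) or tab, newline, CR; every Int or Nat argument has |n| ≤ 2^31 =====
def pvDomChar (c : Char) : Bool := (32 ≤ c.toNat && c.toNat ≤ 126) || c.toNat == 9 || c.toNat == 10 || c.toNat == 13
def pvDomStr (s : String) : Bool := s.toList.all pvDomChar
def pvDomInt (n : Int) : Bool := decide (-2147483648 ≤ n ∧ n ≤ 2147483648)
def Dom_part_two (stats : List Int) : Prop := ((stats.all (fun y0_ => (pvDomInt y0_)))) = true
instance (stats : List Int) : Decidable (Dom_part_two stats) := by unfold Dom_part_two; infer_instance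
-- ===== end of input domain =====

-- B replaces A's per-turn combat simulation with a closed-form ceiling-division turn count; return-value equivalence only.

-- shared module constants (WEAPONS/ARMOR/RINGS as (cost, damage, armor) triples)
def pvWeapons : List (Int × Int × Int) := [(8,4,0),(10,5,0),(25,6,0),(40,7,0),(74,8,0)]
def pvArmor : List (Int × Int × Int) := [(0,0,0),(13,0,1),(31,0,2),(53,0,3),(75,0,4),(102,0,5)]
def pvRings : List (Int × Int × Int) := [(0,0,0),(25,1,0),(50,2,0),(100,3,0),(20,0,1),(40,0,2),(80,0,3)]

-- product(WEAPONS, ARMOR, RINGS, RINGS), in itertools order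
def pvCombos : List ((Int × Int × Int) × (Int × Int × Int) × (Int × Int × Int) × (Int × Int × Int)) :=
  pvWeapons.flatMap (fun w => pvArmor.flatMap (fun a =>
    pvRings.flatMap (fun r1 => pvRings.map (fun r2 => (w, a, r1, r2)))))

-- ===== PORT A =====
-- simulate: returns some true / some false; none = Python's implicit None when the while guard fails at entry
def pvSimulate (boss_damage boss_armor boss_hp damage armor hp : Int) : Option Bool :=
  if hp ≠ 0 ∨ boss_hp ≠ 0 then
    let boss_hp' := boss_hp - (if damage - boss_armor > 1 then damage - boss_armor else 1)
    if boss_hp' ≤ 0 then some true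
    else
      let hp' := hp - (if boss_damage - armor > 1 then boss_damage - armor else 1)
      if hp' ≤ 0 then some false
      else pvSimulate boss_damage boss_armor boss_hp' damage armor hp'
  else none
termination_by boss_hp.toNat
decreasing_by
  rename_i _ h1 _
  simp only [boss_hp'] at h1
  split_ifs at h1 ⊢ <;> omega

def part_two (stats : List Int) : Int :=
  let boss_hit_points := (PySem.List.pyGet? stats 0).getD 0   -- Pre_ guarantees the index exists
  let boss_damage := (PySem.List.pyGet? stats 1).getD 0
  let boss_armor := (PySem.List.pyGet? stats 2).getD 0
  let losses := pvCombos.foldl (fun losses c =>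
    if c.2.2.1 = c.2.2.2 ∧ c.2.2.2 ≠ ((0:Int), (0:Int), (0:Int)) then losses
    else
      let cost := c.1.1 + c.2.1.1 + c.2.2.1.1 + c.2.2.2.1
      let total_damage := c.1.2.1 + c.2.1.2.1 + c.2.2.1.2.1 + c.2.2.2.2.1
      let total_armor := c.1.2.2 + c.2.1.2.2 + c.2.2.1.2.2 + c.2.2.2.2.2
      if pvSimulate boss_damage boss_armor boss_hit_points total_damage total_armor 100 ≠ some true
      then losses ++ [cost] else losses) []
  (PySem.List.max? losses (fun x => x)).getD 0   -- Pre_ guarantees losses ≠ []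

-- ===== PORT B =====
def part_two_alt (stats : List Int) : Int :=
  let boss_hp := (PySem.List.pyGet? stats 0).getD 0
  let boss_damage := (PySem.List.pyGet? stats 1).getD 0
  let boss_armor := (PySem.List.pyGet? stats 2).getD 0
  let losses := (pvCombos.filter (fun (w, a, r1, r2) =>
      !(decide (r1 = r2 ∧ r2 ≠ ((0:Int), (0:Int), (0:Int)))) &&
      decide (-(PySem.Int.floordiv (-boss_hp) (max (w.2.1 + r1.2.1 + r2.2.1 - boss_armor) 1)) >
              -(PySem.Int.floordiv (-100) (max (boss_damage - (a.2.2 + r1.2.2 + r2.2.2)) 1))))).map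
    (fun (w, a, r1, r2) => w.1 + a.1 + r1.1 + r2.1)
  (PySem.List.max? losses (fun x => x)).getD 0

-- ===== PRECONDITION & SPEC =====
-- Pre_ excludes exactly the inputs where A raises: fewer than 3 stats (IndexError), and boss stats
-- against which even the weakest loadout (damage 4, armor 0) wins — then no loadout loses, losses is
-- empty and max(losses) raises ValueError (B's max raises identically there).
def Pre_part_two (stats : List Int) : Prop :=
  3 ≤ stats.length ∧
  -(PySem.Int.floordiv (-(stats.getD 0 0)) (max (4 - stats.getD 2 0) 1)) >
    -(PySem.Int.floordiv (-100) (max (stats.getD 1 0) 1))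
instance (stats : List Int) : Decidable (Pre_part_two stats) := by unfold Pre_part_two; infer_instance

def pvWitness_part_two : List Int := [100, 8, 2]

def Spec_part_two (stats : List Int) (out : Int) : Prop := out = part_two_alt stats
instance (stats : List Int) (out : Int) : Decidable (Spec_part_two stats out) := by unfold Spec_part_two; infer_instance

-- ===== CLAIM (what is proved, stated in full; the proofs are below) =====
def Claim_equal_part_two : Prop := ∀ (stats : List Int), Dom_part_two stats → Pre_part_two stats → Spec_part_two stats (part_two stats)

-- ===== LEMMAS AND PROOFS =====

-- ceiling division -((-a) // b), as B writes it
def pvCdiv (a b : Int) : Int := -(PySem.Int.floordiv (-a) b)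

lemma pvCdiv_bracket {a b : Int} (hb : 0 < b) :
    (pvCdiv a b - 1) * b < a ∧ a ≤ pvCdiv a b * b := by
  have := (PySem.Int.neg_floordiv_neg_eq_iff_of_pos (a := a) (b := b) (q := pvCdiv a b) hb).mp rfl
  exact this

lemma pvCdiv_le_one {a b : Int} (hb : 0 < b) (h : a ≤ b) : pvCdiv a b ≤ 1 := by
  have h1 := pvCdiv_bracket (a := a) (b := b) hb
  nlinarith [h1.1, h1.2]

lemma one_le_pvCdiv {a b : Int} (hb : 0 < b) (h : 0 < a) : 1 ≤ pvCdiv a b := by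
  have h1 := pvCdiv_bracket (a := a) (b := b) hb
  nlinarith [h1.1, h1.2]

lemma pvCdiv_sub {a b : Int} (hb : 0 < b) : pvCdiv (a - b) b = pvCdiv a b - 1 := by
  unfold pvCdiv
  rw [PySem.Int.floordiv_eq_ediv_of_pos hb, PySem.Int.floordiv_eq_ediv_of_pos hb]
  have : -(a - b) = -a + 1 * b := by ring
  rw [this, Int.add_mul_ediv_right _ _ (by omega : b ≠ 0)]
  ring

-- the combat loop computes the closed-form turn comparison (player strikes first, ties are wins)
lemma pvSimulate_eq (bd ba d a : Int) (bh hp : Int) (hhp : 0 < hp) :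
    pvSimulate bd ba bh d a hp =
      some (decide (pvCdiv bh (max (d - ba) 1) ≤ pvCdiv hp (max (bd - a) 1))) := by
  have hpd : (0:Int) < max (d - ba) 1 := by omega
  have hbd : (0:Int) < max (bd - a) 1 := by omega
  fun_induction pvSimulate bd ba bh d a hp with
  | case1 =>
    rename_i bh hp hg bh' hb1
    have e1 : bh' = bh - max (d - ba) 1 := by simp only [bh']; split_ifs <;> omega
    rw [e1] at hb1
    have h1 : pvCdiv bh (max (d - ba) 1) ≤ pvCdiv hp (max (bd - a) 1) :=
      le_trans (pvCdiv_le_one hpd (by omega)) (one_le_pvCdiv hbd hhp)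
    simp [h1]
  | case2 =>
    rename_i bh hp hg bh' hb1 hp' hp2
    have e1 : bh' = bh - max (d - ba) 1 := by simp only [bh']; split_ifs <;> omega
    have e2 : hp' = hp - max (bd - a) 1 := by simp only [hp']; split_ifs <;> omega
    rw [e1] at hb1; rw [e2] at hp2
    have h2 : pvCdiv hp (max (bd - a) 1) ≤ 1 := pvCdiv_le_one hbd (by omega)
    have h3 : 1 ≤ pvCdiv (bh - max (d - ba) 1) (max (d - ba) 1) := one_le_pvCdiv hpd (by omega)
    have h4 := pvCdiv_sub (a := bh) hpd
    simp only [Option.some.injEq]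
    symm
    rw [decide_eq_false_iff_not]
    omega
  | case3 =>
    rename_i bh hp hg bh' hb1 hp' hp2 ih
    have e1 : bh' = bh - max (d - ba) 1 := by simp only [bh']; split_ifs <;> omega
    have e2 : hp' = hp - max (bd - a) 1 := by simp only [hp']; split_ifs <;> omega
    rw [ih (by omega), e1, e2]
    have h4 := pvCdiv_sub (a := bh) hpd
    have h5 := pvCdiv_sub (a := hp) hbd
    simp only [Option.some.injEq]
    rw [decide_eq_decide]
    omega
  | case4 =>
    rename_i bh hp hg
    simp only [not_or, ne_eq, not_not] at hg
    omega


lemma pv_combo_facts : ∀ c ∈ pvCombos, c.1.2.2 = 0 ∧ c.2.1.2.1 = 0 := by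
  intro c hc
  simp only [pvCombos, List.mem_flatMap, List.mem_map] at hc
  obtain ⟨w, hw, a, ha, r1, hr1, r2, hr2, rfl⟩ := hc
  exact ⟨(by decide : ∀ x ∈ pvWeapons, x.2.2 = 0) w hw,
         (by decide : ∀ x ∈ pvArmor, x.2.1 = 0) a ha⟩

lemma pv_losses_eq (bh bd ba : Int) :
    pvCombos.foldl (fun losses c =>
      if c.2.2.1 = c.2.2.2 ∧ c.2.2.2 ≠ ((0:Int), (0:Int), (0:Int)) then losses
      else
        let cost := c.1.1 + c.2.1.1 + c.2.2.1.1 + c.2.2.2.1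
        let total_damage := c.1.2.1 + c.2.1.2.1 + c.2.2.1.2.1 + c.2.2.2.2.1
        let total_armor := c.1.2.2 + c.2.1.2.2 + c.2.2.1.2.2 + c.2.2.2.2.2
        if pvSimulate bd ba bh total_damage total_armor 100 ≠ some true
        then losses ++ [cost] else losses) [] =
    (pvCombos.filter (fun (w, a, r1, r2) =>
      !(decide (r1 = r2 ∧ r2 ≠ ((0:Int), (0:Int), (0:Int)))) &&
      decide (-(PySem.Int.floordiv (-bh) (max (w.2.1 + r1.2.1 + r2.2.1 - ba) 1)) >
              -(PySem.Int.floordiv (-100) (max (bd - (a.2.2 + r1.2.2 + r2.2.2)) 1))))).map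
      (fun (w, a, r1, r2) => w.1 + a.1 + r1.1 + r2.1) := by
  refine Eq.trans (PySem.List.foldl_congr_mem pvCombos _ (fun acc c =>
      if ((!(decide (c.2.2.1 = c.2.2.2 ∧ c.2.2.2 ≠ ((0:Int), (0:Int), (0:Int))))) &&
          decide (-(PySem.Int.floordiv (-bh) (max (c.1.2.1 + c.2.2.1.2.1 + c.2.2.2.2.1 - ba) 1)) >
                  -(PySem.Int.floordiv (-100) (max (bd - (c.2.1.2.2 + c.2.2.1.2.2 + c.2.2.2.2.2)) 1))))
      then acc ++ [c.1.1 + c.2.1.1 + c.2.2.1.1 + c.2.2.2.1] else acc) [] ?_)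
    (Eq.trans (PySem.List.foldl_append_if _ _ pvCombos []) (by rfl))
  · intro acc c hc
    obtain ⟨hw0, ha0⟩ := pv_combo_facts c hc
    dsimp only
    rw [pvSimulate_eq bd ba _ _ bh 100 (by omega)]
    have h1 : c.1.2.1 + c.2.1.2.1 + c.2.2.1.2.1 + c.2.2.2.2.1 - ba
        = c.1.2.1 + c.2.2.1.2.1 + c.2.2.2.2.1 - ba := by omega
    have h2 : bd - (c.1.2.2 + c.2.1.2.2 + c.2.2.1.2.2 + c.2.2.2.2.2)
        = bd - (c.2.1.2.2 + c.2.2.1.2.2 + c.2.2.2.2.2) := by omega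
    by_cases hskip : c.2.2.1 = c.2.2.2 ∧ c.2.2.2 ≠ ((0:Int), (0:Int), (0:Int))
    · simp [hskip]
    · simp [hskip, pvCdiv, h1, h2, not_le]

-- ===== VERDICT (by name: the statement is the Claim_ definition above) =====
theorem part_two_spec : Claim_equal_part_two := by
  intro stats _ _
  unfold Spec_part_two
  simp only [part_two, part_two_alt]
  rw [pv_losses_eq]
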